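-- pv_equiv track=rewrite | github.com/autobytediag/ECUFileOrganizer | ecu_file_organizer/main_window.py | parse_folder_name
-- ===== SOURCE A (Python) =====
-- def parse_folder_name(folder_name):
--     """Parse folder name back to individual components"""
--     parts = folder_name.split('_')
--
--     # Try to extract components
--     # Expected format: Make_Model_Date_ECU_SW{version}_ReadMethod_Mileage_Registration
--     data = {
--         'make': '',
--         'model': '',
--         'date': '',
--         'ecu': '',
--         'sw_version': '',
--         'read_method': '',
--         'mileage': '',
--         'registration': ''
--     }
--
--     if len(parts) < 3:
--         return data
--
--     # Make (first part)
--     data['make'] = parts[0]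
--
--     # Registration (last part, if doesn't end with km)
--     if parts[-1] and not parts[-1].endswith('km'):
--         data['registration'] = parts[-1]
--
--     # Mileage (part ending with 'km')
--     for i in range(len(parts)-1, -1, -1):
--         if parts[i].endswith('km'):
--             data['mileage'] = parts[i].replace('km', '')
--             break
--
--     # SW Version (part starting with 'SW' followed by digits)
--     for part in parts:
--         if part.startswith('SW') and len(part) > 2 and part[2:].isdigit():
--             data['sw_version'] = part[2:]  # Strip 'SW' prefix
--             break
--
--     # Read method (OBD, Bench, Boot, Virtual) - before mileage
--     read_method_keywords = ['OBD', 'Bench', 'Boot', 'Virtual']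
--     for method in read_method_keywords:
--         if method in parts:
--             data['read_method'] = method if method != 'OBD' else 'Normal Read-OBD'
--             break
--
--     # Date (8 digits YYYYMMDD)
--     # Model (between make and date)
--     model_parts = []
--     for i, part in enumerate(parts[1:], 1):
--         if len(part) == 8 and part.isdigit():
--             data['date'] = part
--             data['model'] = '_'.join(model_parts)
--             # Rest is ECU until SW version or read method
--             ecu_parts = []
--             for j in range(i+1, len(parts)):
--                 if (parts[j] in read_method_keywords
--                         or parts[j].endswith('km')
--                         or (parts[j].startswith('SW') and len(parts[j]) > 2
--                             and parts[j][2:].isdigit())):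
--                     break
--                 ecu_parts.append(parts[j])
--             data['ecu'] = '_'.join(ecu_parts)
--             break
--         else:
--             model_parts.append(part)
--
--     return data
-- ===== SOURCE B (Python) =====
-- KEYS = ['make', 'model', 'date', 'ecu', 'sw_version', 'read_method', 'mileage', 'registration']
-- READ_METHOD_KEYWORDS = ['OBD', 'Bench', 'Boot', 'Virtual']
--
--
-- def _is_sw(p):
--     return p.startswith('SW') and len(p) > 2 and p[2:].isdigit()
--
--
-- def _is_date(p):
--     return len(p) == 8 and p.isdigit()
--
--
-- def _is_sentinel(p):
--     return p in READ_METHOD_KEYWORDS or p.endswith('km') or _is_sw(p)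
--
--
-- def parse_folder_name(folder_name):
--     """Parse folder name back to individual components (single forward pass)"""
--     parts = folder_name.split('_')
--     if len(parts) < 3:
--         return {k: '' for k in KEYS}
--
--     # tracker state, updated once per part in one forward walk
--     last_km = None       # last part ending in 'km'
--     first_sw = None      # digits of the first SW<digits> part
--     seen = set()         # read-method keywords present anywhere
--     # date/model/ecu state machine (runs on parts[1:])
--     date = None
--     model_parts, ecu_parts, ecu_open = [], [], False
--
--     def track(p):
--         nonlocal last_km, first_sw
--         if p.endswith('km'):
--             last_km = p
--         if first_sw is None and _is_sw(p):
--             first_sw = p[2:]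
--         if p in READ_METHOD_KEYWORDS:
--             seen.add(p)
--
--     track(parts[0])
--     for p in parts[1:]:
--         track(p)
--         if date is None:
--             if _is_date(p):
--                 date, ecu_open = p, True
--             else:
--                 model_parts.append(p)
--         elif ecu_open:
--             if _is_sentinel(p):
--                 ecu_open = False
--             else:
--                 ecu_parts.append(p)
--
--     read_method = next((m for m in READ_METHOD_KEYWORDS if m in seen), '')
--     if read_method == 'OBD':
--         read_method = 'Normal Read-OBD'
--     last = parts[-1]
--     return {
--         'make': parts[0],
--         'model': '_'.join(model_parts) if date is not None else '',
--         'date': date if date is not None else '',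
--         'ecu': '_'.join(ecu_parts) if date is not None else '',
--         'sw_version': first_sw if first_sw is not None else '',
--         'read_method': read_method,
--         'mileage': last_km.replace('km', '') if last_km is not None else '',
--         'registration': last if last and not last.endswith('km') else ''
--     }
-- ===== Notes on version B (the rewrite author's own statement) =====
-- stated objective: alternative
-- what changed: A's five separate scans with break (a backward index loop for mileage, find-first loops for SW and date, one 'method in parts' rescan per keyword, and a nested index loop for ECU) are fused into one forward pass over parts: a tracker records the last km part, the first SW part and the set of keywords seen, while a date/model/ecu state machine runs alongside; the eight fields are assembled once at the end.
import Mathlib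
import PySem

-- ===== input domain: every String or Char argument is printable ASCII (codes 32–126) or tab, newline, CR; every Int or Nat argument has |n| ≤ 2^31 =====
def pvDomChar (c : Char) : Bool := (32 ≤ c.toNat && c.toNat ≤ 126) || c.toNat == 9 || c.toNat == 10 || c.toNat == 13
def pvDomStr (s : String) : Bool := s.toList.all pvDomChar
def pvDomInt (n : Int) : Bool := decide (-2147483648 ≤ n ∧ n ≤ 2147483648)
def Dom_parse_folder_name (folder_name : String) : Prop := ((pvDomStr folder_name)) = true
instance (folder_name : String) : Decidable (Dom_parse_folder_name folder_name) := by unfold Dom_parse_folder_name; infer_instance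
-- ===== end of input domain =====

-- B fuses A's five separate break-loops into ONE forward pass: a tracker (last km part, first SW
-- part, set of keywords seen) runs alongside a date/model/ecu state machine; objective: alternative.

-- shared predicates (straight transcriptions of the tests both Pythons use)
def pvKw : List String := ["OBD", "Bench", "Boot", "Virtual"]

def pvIsKm (p : String) : Bool := PySem.Str.endswith p "km"

def pvIsSw (p : String) : Bool :=
  PySem.Str.startswith p "SW" && decide (2 < PySem.Str.len p)
    && PySem.Str.strIsdigit (PySem.Str.slice p (some 2) none)

def pvIsDate (p : String) : Bool := PySem.Str.len p == 8 && PySem.Str.strIsdigit p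

def pvIsSentinel (p : String) : Bool := pvKw.contains p || pvIsKm p || pvIsSw p

-- ===== PORT A =====
-- 'for i in range(len(parts)-1,-1,-1): if parts[i].endswith("km"): … break'
-- (indices produced by the range are always in bounds, so pyGetD's default is never read)
def pvAFindKm (parts : List String) : List Int → Option String
  | [] => none
  | i :: is =>
      let p := PySem.List.pyGetD parts i ""
      if pvIsKm p then some p else pvAFindKm parts is

-- 'for part in parts: if part.startswith("SW") … break'
def pvAFindSw : List String → Option String
  | [] => none
  | p :: ps => if pvIsSw p then some p else pvAFindSw ps

-- 'for method in read_method_keywords: if method in parts: … break'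
def pvAFindRm (parts : List String) : List String → Option String
  | [] => none
  | m :: ms => if parts.contains m then some m else pvAFindRm parts ms

-- inner 'for j in range(i+1, len(parts)): if … break; ecu_parts.append(parts[j])'
def pvAEcu (parts : List String) : List Int → List String
  | [] => []
  | j :: js =>
      let p := PySem.List.pyGetD parts j ""
      if pvIsSentinel p then [] else p :: pvAEcu parts js

-- 'for i, part in enumerate(parts[1:], 1): …' with the model_parts accumulator;
-- returns (date, model_parts, ecu_parts) of the break iteration, none if no date is found
def pvADate (parts : List String) : List (Int × String) → List String → Option (String × List String × List String)
  | [], _ => none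
  | (i, part) :: rest, acc =>
      if pvIsDate part then
        some (part, acc, pvAEcu parts (PySem.List.pyRange (i + 1) (parts.length : Int) 1))
      else pvADate parts rest (acc ++ [part])

def parse_folder_name (folder_name : String) : List (String × String) :=
  -- '_' ≠ "" so split? never returns none
  let parts := (PySem.Str.split? folder_name "_").getD []
  let data : PySem.Dict String String := PySem.Dict.mk
    [("make", ""), ("model", ""), ("date", ""), ("ecu", ""),
     ("sw_version", ""), ("read_method", ""), ("mileage", ""), ("registration", "")]
  if parts.length < 3 then data.items else
  let data := data.insert "make" (PySem.List.pyGetD parts 0 "")   -- parts[0], in range (len ≥ 3)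
  let last := PySem.List.pyGetD parts (-1) ""                      -- parts[-1], in range (len ≥ 3)
  let data := if last ≠ "" ∧ PySem.Str.endswith last "km" = false then data.insert "registration" last else data
  let data := match pvAFindKm parts (PySem.List.pyRange ((parts.length : Int) - 1) (-1) (-1)) with
    | some p => data.insert "mileage" (PySem.Str.replace p "km" "")
    | none => data
  let data := match pvAFindSw parts with
    | some p => data.insert "sw_version" (PySem.Str.slice p (some 2) none)
    | none => data
  let data := match pvAFindRm parts pvKw with
    | some m => data.insert "read_method" (if m == "OBD" then "Normal Read-OBD" else m)
    | none => data
  let data := match pvADate parts (PySem.List.enumerate (PySem.List.slice parts (some 1) none) 1) [] with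
    | some (d, model, ecu) =>
        ((data.insert "date" d).insert "model" (PySem.Str.join "_" model)).insert "ecu" (PySem.Str.join "_" ecu)
    | none => data
  data.items

-- ===== PORT B =====
def pvKeys : List String :=
  ["make", "model", "date", "ecu", "sw_version", "read_method", "mileage", "registration"]

-- tracker state of B's single pass: last_km, first_sw, seen (a Python set)
structure PvTrack where
  lastKm : Option String
  firstSw : Option String
  seen : PySem.Set String

-- 'def track(p): …' — one tracker update per part
def pvTrackStep (t : PvTrack) (p : String) : PvTrack :=
  let t := if pvIsKm p then { t with lastKm := some p } else t
  let t := if t.firstSw.isNone && pvIsSw p then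
             { t with firstSw := some (PySem.Str.slice p (some 2) none) } else t
  if pvKw.contains p then { t with seen := PySem.Set.add t.seen p } else t

-- the date/model/ecu state machine variables of B's loop
structure PvMach where
  date : Option String
  model : List String
  ecu : List String
  ecuOpen : Bool

-- 'for p in parts[1:]: track(p); <state machine>'
def pvBLoop : List String → PvTrack → PvMach → PvTrack × PvMach
  | [], t, m => (t, m)
  | p :: ps, t, m =>
      let t := pvTrackStep t p
      let m :=
        if m.date.isNone then
          if pvIsDate p then { m with date := some p, ecuOpen := true }
          else { m with model := m.model ++ [p] }
        else if m.ecuOpen then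
          if pvIsSentinel p then { m with ecuOpen := false }
          else { m with ecu := m.ecu ++ [p] }
        else m
      pvBLoop ps t m

def parse_folder_name_alt (folder_name : String) : List (String × String) :=
  let parts := (PySem.Str.split? folder_name "_").getD []   -- '_' ≠ "" so split? never returns none
  if parts.length < 3 then pvKeys.map (fun k => (k, "")) else
  let t0 := pvTrackStep ⟨none, none, PySem.Set.empty⟩ (PySem.List.pyGetD parts 0 "")  -- track(parts[0])
  let st := pvBLoop (PySem.List.slice parts (some 1) none) t0 ⟨none, [], [], false⟩
  let t := st.1
  let m := st.2
  -- read_method = next((m for m in KW if m in seen), ''), then the OBD remap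
  let read_method := match pvKw.find? (fun k => PySem.Set.contains t.seen k) with
    | some k => if k == "OBD" then "Normal Read-OBD" else k
    | none => ""
  let last := PySem.List.pyGetD parts (-1) ""
  [("make", PySem.List.pyGetD parts 0 ""),
   ("model", if m.date.isSome then PySem.Str.join "_" m.model else ""),
   ("date", m.date.getD ""),
   ("ecu", if m.date.isSome then PySem.Str.join "_" m.ecu else ""),
   ("sw_version", t.firstSw.getD ""),
   ("read_method", read_method),
   ("mileage", match t.lastKm with | some p => PySem.Str.replace p "km" "" | none => ""),
   ("registration", if last ≠ "" ∧ PySem.Str.endswith last "km" = false then last else "")]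

-- ===== PRECONDITION & SPEC =====
def Spec_parse_folder_name (folder_name : String) (out : List (String × String)) : Prop := out = parse_folder_name_alt folder_name
instance (folder_name : String) (out : List (String × String)) : Decidable (Spec_parse_folder_name folder_name out) := by unfold Spec_parse_folder_name; infer_instance

-- ===== CLAIM (what is proved, stated in full; the proofs are below) =====
def Claim_equal_parse_folder_name : Prop := ∀ (folder_name : String), Dom_parse_folder_name folder_name → Spec_parse_folder_name folder_name (parse_folder_name folder_name)

-- ===== LEMMAS AND PROOFS =====

-- ---- A-side characterisations ----
theorem pvAFindKm_eq_find? (parts : List String) (js : List Int) :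
    pvAFindKm parts js = (js.map (fun i => PySem.List.pyGetD parts i "")).find? pvIsKm := by
  induction js with
  | nil => rfl
  | cons i is ih => simp only [pvAFindKm, List.map_cons, List.find?]; split <;> simp_all

theorem pvAFindKm_eq (parts : List String) :
    pvAFindKm parts (PySem.List.pyRange ((parts.length : Int) - 1) (-1) (-1))
      = (parts.filter pvIsKm).getLast? := by
  rw [PySem.List.pyRange_neg_one_eq_reverse]
  have h1 : (-1 : Int) + 1 = 0 := by norm_num
  have h2 : (parts.length : Int) - 1 + 1 = (parts.length : Int) := by ring
  rw [h1, h2, pvAFindKm_eq_find?, List.map_reverse, PySem.List.map_pyGetD_pyRange_zero',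
    ← List.head?_filter, List.filter_reverse, List.head?_reverse]

theorem pvAFindSw_eq (l : List String) : pvAFindSw l = (l.filter pvIsSw).head? := by
  rw [List.head?_filter]
  induction l with
  | nil => rfl
  | cons p ps ih => simp only [pvAFindSw, List.find?]; split <;> simp_all

theorem pvAFindRm_eq (parts l : List String) :
    pvAFindRm parts l = (l.filter (fun m => parts.contains m)).head? := by
  rw [List.head?_filter]
  induction l with
  | nil => rfl
  | cons m ms ih => simp only [pvAFindRm, List.find?]; split <;> simp_all

theorem pvAEcu_eq (parts : List String) (l : List String) (j : Int) (h0 : 0 ≤ j)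
    (hd : parts.drop j.toNat = l) :
    pvAEcu parts (PySem.List.pyRange j (parts.length : Int) 1)
      = l.takeWhile (fun p => !pvIsSentinel p) := by
  induction l generalizing j with
  | nil =>
      have hle : parts.length ≤ j.toNat := List.drop_eq_nil_iff.mp hd
      have : (parts.length : Int) ≤ j := by omega
      rw [PySem.List.pyRange_one_eq_nil this]
      rfl
  | cons p l' ih =>
      have hlt : j.toNat < parts.length := by
        by_contra hc
        rw [List.drop_eq_nil_iff.mpr (by omega)] at hd
        simp at hd
      have hget : parts[j.toNat]? = some p := by
        rw [← List.head?_drop, hd]; rfl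
      have hjp : j < (parts.length : Int) := by omega
      rw [PySem.List.pyRange_one_cons hjp]
      have hpv : PySem.List.pyGetD parts j "" = p := by
        rw [PySem.List.pyGetD_eq_getElem parts "" h0 (by omega)]
        exact Option.some_injective _ (by rw [← List.getElem?_eq_getElem]; exact hget)
      have hd' : parts.drop (j + 1).toNat = l' := by
        have : (j + 1).toNat = j.toNat + 1 := by omega
        rw [this, ← List.tail_drop, hd]
        rfl
      simp only [pvAEcu, hpv, List.takeWhile_cons]
      by_cases hs : pvIsSentinel p
      · simp [hs]
      · simp [hs, ih (j + 1) (by omega) hd']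

theorem pvADate_eq (parts : List String) (t : List String) (k : Int) (acc : List String) :
    pvADate parts (PySem.List.enumerate t k) acc =
      match t.dropWhile (fun p => !pvIsDate p) with
      | [] => none
      | d :: _ => some (d, acc ++ t.takeWhile (fun p => !pvIsDate p),
          pvAEcu parts (PySem.List.pyRange
            (k + ((t.takeWhile (fun p => !pvIsDate p)).length : Int) + 1) (parts.length : Int) 1)) := by
  induction t generalizing k acc with
  | nil => rfl
  | cons p t' ih =>
      by_cases hp : pvIsDate p
      · simp [PySem.List.enumerate, pvADate, hp]
      · have h1 : (p :: t').dropWhile (fun p => !pvIsDate p) = t'.dropWhile (fun p => !pvIsDate p) := by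
          simp [hp]
        have h2 : (p :: t').takeWhile (fun p => !pvIsDate p) = p :: t'.takeWhile (fun p => !pvIsDate p) := by
          simp [hp]
        simp only [PySem.List.enumerate, pvADate]
        rw [if_neg hp, ih (k + 1) (acc ++ [p]), h1, h2]
        cases t'.dropWhile (fun p => !pvIsDate p) with
        | nil => rfl
        | cons d rest =>
            simp only [List.length_cons, List.append_assoc, List.cons_append, List.nil_append]
            have harith : k + 1 + ((t'.takeWhile (fun p => !pvIsDate p)).length : Int) + 1
                = k + (((t'.takeWhile (fun p => !pvIsDate p)).length + 1 : Nat) : Int) + 1 := by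
              push_cast; ring
            simp [harith]

-- ---- B-side: the tracker projections of the single pass ----
theorem pvTrackStep_lastKm (t : PvTrack) (p : String) :
    (pvTrackStep t p).lastKm = if pvIsKm p then some p else t.lastKm := by
  simp only [pvTrackStep]; split_ifs <;> rfl

theorem pvTrackStep_firstSw (t : PvTrack) (p : String) :
    (pvTrackStep t p).firstSw =
      if t.firstSw.isNone && pvIsSw p then some (PySem.Str.slice p (some 2) none) else t.firstSw := by
  simp only [pvTrackStep]; split_ifs <;> rfl

theorem pvTrackStep_seen (t : PvTrack) (p : String) :
    (pvTrackStep t p).seen = if pvKw.contains p then PySem.Set.add t.seen p else t.seen := by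
  simp only [pvTrackStep]; split_ifs <;> rfl

theorem pvBLoop_fst (l : List String) (t : PvTrack) (m : PvMach) :
    (pvBLoop l t m).1 = l.foldl pvTrackStep t := by
  induction l generalizing t m with
  | nil => rfl
  | cons p ps ih => simp only [pvBLoop, List.foldl_cons]; exact ih _ _

theorem pvGetLast?_cons_or {α : Type} (p : α) (xs : List α) :
    (p :: xs).getLast? = xs.getLast?.or (some p) := by
  induction xs generalizing p with
  | nil => rfl
  | cons x xs ih =>
      rw [List.getLast?_cons_cons, ih x]
      cases hx : xs.getLast? <;> simp

theorem pvFoldTrack_lastKm (l : List String) (t : PvTrack) :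
    (l.foldl pvTrackStep t).lastKm = ((l.filter pvIsKm).getLast?).or t.lastKm := by
  induction l generalizing t with
  | nil => simp
  | cons p ps ih =>
      rw [List.foldl_cons, ih, List.filter_cons]
      by_cases hk : pvIsKm p
      · simp only [hk, if_true, pvTrackStep_lastKm, pvGetLast?_cons_or, Option.or_assoc]
        simp
      · simp [hk, pvTrackStep_lastKm]

theorem pvFoldTrack_firstSw (l : List String) (t : PvTrack) :
    (l.foldl pvTrackStep t).firstSw =
      t.firstSw.or (((l.filter pvIsSw).head?).map (fun p => PySem.Str.slice p (some 2) none)) := by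
  induction l generalizing t with
  | nil => simp
  | cons p ps ih =>
      rw [List.foldl_cons, ih, List.filter_cons, pvTrackStep_firstSw]
      cases hf : t.firstSw with
      | some s => by_cases hs : pvIsSw p <;> simp [hs]
      | none => by_cases hs : pvIsSw p <;> simp [hs]

theorem pvFoldTrack_seen_mem (l : List String) (t : PvTrack) (x : String) :
    x ∈ (l.foldl pvTrackStep t).seen ↔ x ∈ t.seen ∨ (x ∈ l ∧ x ∈ pvKw) := by
  induction l generalizing t with
  | nil => simp
  | cons p ps ih =>
      rw [List.foldl_cons, ih, pvTrackStep_seen]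
      by_cases hp : pvKw.contains p
      · have hpm : p ∈ pvKw := by simpa using hp
        rw [if_pos hp, PySem.Set.mem_add]
        by_cases hxp : x = p <;> simp [hxp, hpm, List.mem_cons] <;> tauto
      · have hpm : p ∉ pvKw := by simpa using hp
        rw [if_neg hp]
        by_cases hxp : x = p <;> simp [hxp, List.mem_cons] <;> tauto

-- B's 'next((m for m in KW if m in seen), …)' scans the keyword list against the seen-set
theorem pvRm_eq (p0 : String) (rest : List String) :
    pvKw.find? (fun k => PySem.Set.contains
        ((rest.foldl pvTrackStep (pvTrackStep ⟨none, none, PySem.Set.empty⟩ p0)).seen) k)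
      = (pvKw.filter (fun m => (p0 :: rest).contains m)).head? := by
  rw [← List.head?_filter]
  congr 1
  apply List.filter_congr
  intro x hx
  have h1 : (x ∈ ((rest.foldl pvTrackStep (pvTrackStep ⟨none, none, PySem.Set.empty⟩ p0)).seen))
      ↔ x ∈ (p0 :: rest) := by
    rw [← List.foldl_cons, pvFoldTrack_seen_mem]
    simp [PySem.Set.empty, hx]
  simp only [PySem.Set.empty] at h1
  have h2 : x ∈ (p0 :: rest) ↔ x = p0 ∨ x ∈ rest := List.mem_cons
  simp [PySem.Set.contains, h1.trans h2]

-- ---- B-side: the state-machine projections ----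
theorem pvBLoop_mach_closed (l : List String) (t : PvTrack) (d : String) (mo ec : List String) :
    (pvBLoop l t ⟨some d, mo, ec, false⟩).2 = ⟨some d, mo, ec, false⟩ := by
  induction l generalizing t with
  | nil => rfl
  | cons p ps ih =>
      have h1 : (pvBLoop (p :: ps) t ⟨some d, mo, ec, false⟩).2
          = (pvBLoop ps (pvTrackStep t p) ⟨some d, mo, ec, false⟩).2 := by
        simp [pvBLoop]
      rw [h1]; exact ih _

theorem pvBLoop_mach_open (l : List String) (t : PvTrack) (d : String) (mo ec : List String) :
    (pvBLoop l t ⟨some d, mo, ec, true⟩).2 =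
      ⟨some d, mo, ec ++ l.takeWhile (fun p => !pvIsSentinel p),
        l.all (fun p => !pvIsSentinel p)⟩ := by
  induction l generalizing t ec with
  | nil => simp [pvBLoop]
  | cons p ps ih =>
      by_cases hs : pvIsSentinel p
      · have h1 : (pvBLoop (p :: ps) t ⟨some d, mo, ec, true⟩).2
            = (pvBLoop ps (pvTrackStep t p) ⟨some d, mo, ec, false⟩).2 := by
          simp [pvBLoop, hs]
        rw [h1, pvBLoop_mach_closed]; simp [hs]
      · have h1 : (pvBLoop (p :: ps) t ⟨some d, mo, ec, true⟩).2
            = (pvBLoop ps (pvTrackStep t p) ⟨some d, mo, ec ++ [p], true⟩).2 := by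
          simp [pvBLoop, hs]
        rw [h1, ih]; simp [hs]

theorem pvBLoop_mach_none (l : List String) (t : PvTrack) (mo : List String) :
    (pvBLoop l t ⟨none, mo, [], false⟩).2 =
      match l.dropWhile (fun p => !pvIsDate p) with
      | [] => ⟨none, mo ++ l.takeWhile (fun p => !pvIsDate p), [], false⟩
      | d :: rest => ⟨some d, mo ++ l.takeWhile (fun p => !pvIsDate p),
          rest.takeWhile (fun p => !pvIsSentinel p), rest.all (fun p => !pvIsSentinel p)⟩ := by
  induction l generalizing t mo with
  | nil => simp [pvBLoop]
  | cons p ps ih =>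
      by_cases hp : pvIsDate p
      · have h1 : (pvBLoop (p :: ps) t ⟨none, mo, [], false⟩).2
            = (pvBLoop ps (pvTrackStep t p) ⟨some p, mo, [], true⟩).2 := by
          simp [pvBLoop, hp]
        rw [h1, pvBLoop_mach_open]; simp [hp]
      · have h1 : (pvBLoop (p :: ps) t ⟨none, mo, [], false⟩).2
            = (pvBLoop ps (pvTrackStep t p) ⟨none, mo ++ [p], [], false⟩).2 := by
          simp [pvBLoop, hp]
        rw [h1, ih]
        have h2 : (p :: ps).dropWhile (fun p => !pvIsDate p) = ps.dropWhile (fun p => !pvIsDate p) := by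
          simp [hp]
        have h3 : (p :: ps).takeWhile (fun p => !pvIsDate p) = p :: ps.takeWhile (fun p => !pvIsDate p) := by
          simp [hp]
        rw [h2, h3]
        cases ps.dropWhile (fun p => !pvIsDate p) <;> simp

theorem pvDrop_takeWhile {α : Type} (t : List α) (q : α → Bool) :
    t.drop (t.takeWhile q).length = t.dropWhile q := by
  have h := congrArg (List.drop (t.takeWhile q).length) (List.takeWhile_append_dropWhile (p := q) (l := t))
  rw [← h]; exact List.drop_left

-- ===== VERDICT (by name: the statement is the Claim_ definition above) =====
set_option maxHeartbeats 2000000 in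
theorem parse_folder_name_spec : Claim_equal_parse_folder_name := by
  intro folder_name _
  unfold Spec_parse_folder_name parse_folder_name parse_folder_name_alt
  set parts := (PySem.Str.split? folder_name "_").getD [] with hparts
  by_cases hlen : parts.length < 3
  · simp [hlen, pvKeys]
  · simp only [if_neg hlen]
    have hne : parts ≠ [] := by intro h; rw [h] at hlen; simp at hlen
    obtain ⟨p0, rest, hpr⟩ := List.exists_cons_of_ne_nil hne
    rw [hpr]
    have hs1 : PySem.List.slice (p0 :: rest) (some 1) none = rest := by
      rw [PySem.List.slice_from _ (by norm_num)]; rfl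
    have hg0 : PySem.List.pyGetD (p0 :: rest) 0 "" = p0 := by
      simp [PySem.List.pyGetD_zero_cons]
    rw [hs1, hg0]
    rw [pvAFindKm_eq (p0 :: rest), pvAFindSw_eq, pvAFindRm_eq, pvADate_eq (p0 :: rest) rest 1 []]
    rw [pvBLoop_fst, pvBLoop_mach_none]
    have hkm : (rest.foldl pvTrackStep (pvTrackStep ⟨none, none, PySem.Set.empty⟩ p0)).lastKm
        = ((p0 :: rest).filter pvIsKm).getLast? := by
      rw [← List.foldl_cons, pvFoldTrack_lastKm]; simp
    have hsw : (rest.foldl pvTrackStep (pvTrackStep ⟨none, none, PySem.Set.empty⟩ p0)).firstSw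
        = ((p0 :: rest).filter pvIsSw).head?.map (fun p => PySem.Str.slice p (some 2) none) := by
      rw [← List.foldl_cons, pvFoldTrack_firstSw]; simp
    rw [hkm, hsw, pvRm_eq]
    cases hdw : rest.dropWhile (fun p => !pvIsDate p) with
    | nil =>
        cases hml : ((p0 :: rest).filter pvIsKm).getLast? <;>
          cases hswv : ((p0 :: rest).filter pvIsSw).head? <;>
            cases hrmv : (pvKw.filter (fun m => (p0 :: rest).contains m)).head? <;>
              split_ifs <;> simp_all [PySem.Dict.insert, PySem.Dict.contains]
    | cons d after =>
        have hdrop : rest.drop ((rest.takeWhile (fun p => !pvIsDate p)).length + 1) = after := by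
          rw [← List.tail_drop, pvDrop_takeWhile, hdw]; rfl
        have hAecu : pvAEcu (p0 :: rest) (PySem.List.pyRange
            (1 + ((rest.takeWhile (fun p => !pvIsDate p)).length : Int) + 1)
            (((p0 :: rest).length : Nat) : Int) 1) = after.takeWhile (fun p => !pvIsSentinel p) := by
          apply pvAEcu_eq (p0 :: rest) after _ (by positivity)
          have h : ((1 : Int) + ((rest.takeWhile (fun p => !pvIsDate p)).length : Int) + 1).toNat
              = ((rest.takeWhile (fun p => !pvIsDate p)).length + 1) + 1 := by omega
          rw [h, List.drop_succ_cons]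
          exact hdrop
        simp only [hAecu]
        cases hml : ((p0 :: rest).filter pvIsKm).getLast? <;>
          cases hswv : ((p0 :: rest).filter pvIsSw).head? <;>
            cases hrmv : (pvKw.filter (fun m => (p0 :: rest).contains m)).head? <;>
              split_ifs <;> simp_all [PySem.Dict.insert, PySem.Dict.contains]
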